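-- pv_equiv track=rewrite | github.com/anttttti/Wordbatch | wordbatch/transformers/tokenizer.py | make_corrections_index
-- ===== SOURCE A (Python) =====
-- from collections import defaultdict
--
-- def get_deletions(word, order):
-- 	stack = {word: order}
-- 	results = {}
-- 	while len(stack) > 0:
-- 		stack2 = {}
-- 		for word2 in stack:
-- 			order2 = stack[word2] - 1
-- 			for x in range(len(word2)):
-- 				if order2 != 0:  stack2[word2[:x] + word2[x + 1:]] = order2
-- 				results[word2[:x] + word2[x + 1:]] = 1
-- 		stack = stack2
-- 	return list(results.keys())
--
-- def make_corrections_index(dft, spellcor_count, spellcor_dist):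
-- 	dft2 = {w[0]: w[1] for w in dft.items() if w[1] > spellcor_count}
-- 	corrections_index = defaultdict(list)
-- 	for word in dft2:
-- 		if len(word) > 15:  continue
-- 		for word2 in get_deletions(word, spellcor_dist):
-- 			corrections_index[word2].append(word)
-- 	return corrections_index
-- ===== SOURCE B (Python) =====
-- from collections import defaultdict
--
-- def _del_comb(word, k):
--     # all results of deleting exactly k characters from word, deleted position
--     # sets enumerated in lexicographic order (duplicates included)
--     if k == 0:
--         return [word]
--     if not word:
--         return []
--     head, tail = word[0], word[1:]
--     return _del_comb(tail, k - 1) + [head + w for w in _del_comb(tail, k)]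
--
-- def _deletions(word, order):
--     n = len(word)
--     depth = min(order, n) if order >= 1 else n
--     out = []
--     for k in range(1, depth + 1):
--         out.extend(_del_comb(word, k))
--     return list(dict.fromkeys(out))
--
-- def make_corrections_index(dft, spellcor_count, spellcor_dist):
--     index = defaultdict(list)
--     for word, count in dft.items():
--         if count <= spellcor_count or len(word) > 15:
--             continue
--         for w2 in _deletions(word, spellcor_dist):
--             index[w2].append(word)
--     return index
-- ===== Notes on version B (the rewrite author's own statement) =====
-- stated objective: alternative
-- what changed: get_deletions' breadth-first frontier of dicts (stack/stack2/results) is replaced by direct per-depth enumeration of deletion combinations via structural recursion on the word (delete-head vs keep-head), concatenated over depths 1..min(order, len(word)) (all depths when order < 1) with one final ordered dedup; the outer function builds the inverted index in a single pass over dft.items() with a combined filter instead of first materialising the dft2 dict comprehension.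
import Mathlib
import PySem

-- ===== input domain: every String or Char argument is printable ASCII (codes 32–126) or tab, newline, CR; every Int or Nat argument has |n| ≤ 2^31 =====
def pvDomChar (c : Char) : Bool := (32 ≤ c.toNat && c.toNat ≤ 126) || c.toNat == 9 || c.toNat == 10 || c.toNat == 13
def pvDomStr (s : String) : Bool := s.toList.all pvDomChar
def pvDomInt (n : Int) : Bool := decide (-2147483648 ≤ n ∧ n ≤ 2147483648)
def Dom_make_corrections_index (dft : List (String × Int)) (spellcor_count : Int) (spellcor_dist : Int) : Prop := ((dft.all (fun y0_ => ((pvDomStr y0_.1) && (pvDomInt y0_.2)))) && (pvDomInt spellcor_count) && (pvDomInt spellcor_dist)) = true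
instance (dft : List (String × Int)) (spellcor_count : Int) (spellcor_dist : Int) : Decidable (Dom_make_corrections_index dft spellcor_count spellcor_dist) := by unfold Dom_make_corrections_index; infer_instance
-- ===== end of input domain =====

-- B replaces A's breadth-first frontier of dicts by direct per-depth enumeration of deletion
-- combinations (structural recursion on the word) with one final ordered dedup; same return value.

-- ===== PORT A =====
-- get_deletions is ported on List Char (PySem string primitives are defined on List Char);
-- the inner `for x in range(len(word2))` loop threads the pair (stack2, results).
def pvGetDelStep (p : PySem.Dict (List Char) Int × PySem.Dict (List Char) Int)
    (kv : List Char × Int) : PySem.Dict (List Char) Int × PySem.Dict (List Char) Int :=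
  let word2 := kv.1
  let order2 := kv.2 - 1
  (List.range word2.length).foldl (fun q (x : Nat) =>
      (if order2 ≠ 0 then
        q.1.insert (PySem.List.slice word2 none (some (x : Int)) ++
          PySem.List.slice word2 (some ((x : Int) + 1)) none) order2
       else q.1,
       q.2.insert (PySem.List.slice word2 none (some (x : Int)) ++
          PySem.List.slice word2 (some ((x : Int) + 1)) none) 1)) p

-- `while len(stack) > 0`: fuel word.length + 2 bounds the number of iterations (each level
-- shortens every stack word by one); the fuel guard only makes the same computation total.
def pvGetDelLoop : Nat → PySem.Dict (List Char) Int → PySem.Dict (List Char) Int →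
    PySem.Dict (List Char) Int
  | 0, _, results => results
  | fuel + 1, stack, results =>
    if stack.items.length = 0 then results
    else
      let p := stack.items.foldl pvGetDelStep (PySem.Dict.empty, results)
      pvGetDelLoop fuel p.1 p.2

def pvGetDeletions (word : List Char) (order : Int) : List (List Char) :=
  (pvGetDelLoop (word.length + 2)
      ((PySem.Dict.empty : PySem.Dict (List Char) Int).insert word order)
      PySem.Dict.empty).keys

def make_corrections_index (dft : List (String × Int)) (spellcor_count : Int) (spellcor_dist : Int) : List (String × List String) :=
  let dft2 : PySem.Dict String Int :=
    dft.foldl (fun d w => if w.2 > spellcor_count then d.insert w.1 w.2 else d) PySem.Dict.empty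
  let ci : PySem.Dict String (List String) :=
    dft2.keys.foldl (fun d word =>
      if PySem.Str.len word > 15 then d
      else (pvGetDeletions word.toList spellcor_dist).foldl
          (fun d w2 => d.modify (String.ofList w2) [] (fun l => l ++ [word])) d)
      PySem.Dict.empty
  ci.items

-- ===== PORT B =====
-- _del_comb: all results of deleting exactly k characters, deletion-position sets in lex order.
def pvDelComb : List Char → Nat → List (List Char)
  | l, 0 => [l]
  | [], _ + 1 => []
  | c :: t, k + 1 => pvDelComb t k ++ (pvDelComb t (k + 1)).map (fun w => c :: w)

-- _deletions: depths 1..depth, then list(dict.fromkeys(out)) = PySem.List.dedup.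
def pvDeletionsAlt (w : List Char) (o : Int) : List (List Char) :=
  let depth : Nat := if 1 ≤ o then min o.toNat w.length else w.length
  PySem.List.dedup (((List.range depth).map (fun i => pvDelComb w (i + 1))).flatten)

def make_corrections_index_alt (dft : List (String × Int)) (spellcor_count : Int) (spellcor_dist : Int) : List (String × List String) :=
  (dft.foldl (fun idx p =>
      if p.2 ≤ spellcor_count ∨ PySem.Str.len p.1 > 15 then idx
      else (pvDeletionsAlt p.1.toList spellcor_dist).foldl
          (fun idx w2 => idx.modify (String.ofList w2) [] (fun l => l ++ [p.1])) idx)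
    (PySem.Dict.empty : PySem.Dict String (List String))).items

-- ===== PRECONDITION & SPEC =====
-- Python's dft is a dict, so its items always carry distinct keys; Pre_ only excludes
-- association lists with duplicate keys, which no dict argument of A can produce.
def Pre_make_corrections_index (dft : List (String × Int)) (spellcor_count : Int) (spellcor_dist : Int) : Prop :=
  (dft.map Prod.fst).Nodup
instance (dft : List (String × Int)) (spellcor_count : Int) (spellcor_dist : Int) : Decidable (Pre_make_corrections_index dft spellcor_count spellcor_dist) := by unfold Pre_make_corrections_index; infer_instance

def pvWitness_make_corrections_index : (List (String × Int)) × Int × Int := ([("ab", 2), ("b", 1)], 0, 1)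

def Spec_make_corrections_index (dft : List (String × Int)) (spellcor_count : Int) (spellcor_dist : Int) (out : List (String × List String)) : Prop := out = make_corrections_index_alt dft spellcor_count spellcor_dist
instance (dft : List (String × Int)) (spellcor_count : Int) (spellcor_dist : Int) (out : List (String × List String)) : Decidable (Spec_make_corrections_index dft spellcor_count spellcor_dist out) := by unfold Spec_make_corrections_index; infer_instance

-- ===== CLAIM (what is proved, stated in full; the proofs are below) =====
def Claim_equal_make_corrections_index : Prop := ∀ (dft : List (String × Int)) (spellcor_count : Int) (spellcor_dist : Int), Dom_make_corrections_index dft spellcor_count spellcor_dist → Pre_make_corrections_index dft spellcor_count spellcor_dist → Spec_make_corrections_index dft spellcor_count spellcor_dist (make_corrections_index dft spellcor_count spellcor_dist)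

-- ===== LEMMAS AND PROOFS =====

-- ---- ordered first-occurrence dedup (= list(dict.fromkeys(..))) and its calculus ----
def pvDedup {α : Type} [DecidableEq α] : List α → List α
  | [] => []
  | x :: xs => x :: (pvDedup xs).filter (fun y => decide (y ≠ x))

theorem pv_mem_dedup {α : Type} [DecidableEq α] (xs : List α) (y : α) :
    y ∈ pvDedup xs ↔ y ∈ xs := by
  induction xs with
  | nil => simp [pvDedup]
  | cons x xs ih =>
    by_cases h : y = x <;> simp [pvDedup, List.mem_filter, h, ih]

theorem pv_nodup {α : Type} [DecidableEq α] (xs : List α) : (pvDedup xs).Nodup := by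
  induction xs with
  | nil => simp [pvDedup]
  | cons x xs ih =>
    refine List.Nodup.cons ?_ (ih.filter _)
    intro h
    have := (List.mem_filter.mp h).2
    simp at this

theorem pv_dedup_eq_self {α : Type} [DecidableEq α] {xs : List α} (h : xs.Nodup) :
    pvDedup xs = xs := by
  induction xs with
  | nil => rfl
  | cons x xs ih =>
    have hx := (List.nodup_cons.mp h).1
    have hn := (List.nodup_cons.mp h).2
    simp only [pvDedup, ih hn]
    congr 1
    apply List.filter_eq_self.mpr
    intro a ha
    simp only [decide_eq_true_eq]
    exact fun e => hx (e ▸ ha)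

theorem pv_dedup_append {α : Type} [DecidableEq α] (xs ys : List α) :
    pvDedup (xs ++ ys) = pvDedup xs ++ (pvDedup ys).filter (fun y => decide (y ∉ xs)) := by
  induction xs with
  | nil => simp [pvDedup]
  | cons x xs ih =>
    simp only [List.cons_append, pvDedup, ih, List.filter_append, List.filter_filter]
    congr 2
    apply List.filter_congr
    intro a _
    by_cases e : a = x <;> by_cases m : a ∈ xs <;> simp [e, m]

theorem pv_congr_left {α : Type} [DecidableEq α] {xs xs' : List α} (zs : List α)
    (h : pvDedup xs = pvDedup xs') :
    pvDedup (xs ++ zs) = pvDedup (xs' ++ zs) := by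
  rw [pv_dedup_append, pv_dedup_append, h]
  congr 1
  apply List.filter_congr
  intro a _
  have hiff : a ∈ xs ↔ a ∈ xs' := by
    rw [← pv_mem_dedup, h, pv_mem_dedup]
  by_cases m : a ∈ xs
  · simp [m, hiff.mp m]
  · have m' : a ∉ xs' := fun mm => m (hiff.mpr mm)
    simp [m, m']

theorem pv_congr_right {α : Type} [DecidableEq α] (xs : List α) {zs zs' : List α}
    (h : pvDedup zs = pvDedup zs') :
    pvDedup (xs ++ zs) = pvDedup (xs ++ zs') := by
  rw [pv_dedup_append, pv_dedup_append, h]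

theorem pv_dup_middle {α : Type} [DecidableEq α] {y : α} {X : List α} (Z : List α)
    (h : y ∈ X) : pvDedup (X ++ y :: Z) = pvDedup (X ++ Z) := by
  rw [pv_dedup_append, pv_dedup_append]
  congr 1
  show (pvDedup (y :: Z)).filter _ = _
  simp only [pvDedup, List.filter_cons, List.filter_filter]
  have hy : decide (y ∉ X) = false := by simp [h]
  rw [hy]
  simp only [Bool.false_eq_true, if_false]
  apply List.filter_congr
  intro a _
  by_cases e : a = y
  · subst e; simp [h]
  · simp [e]

theorem pv_map_inj {α β : Type} [DecidableEq α] [DecidableEq β] (f : α → β)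
    (hf : Function.Injective f) (xs : List α) :
    pvDedup (xs.map f) = (pvDedup xs).map f := by
  induction xs with
  | nil => rfl
  | cons x xs ih =>
    simp only [List.map_cons, pvDedup, ih, List.filter_map]
    congr 2
    apply List.filter_congr
    intro a _
    simp [Function.comp, hf.ne_iff]

theorem pv_flatMap_filter_ne {α β : Type} [DecidableEq α] [DecidableEq β]
    (f : α → List β) (x : α) (M : List α) :
    (pvDedup ((M.filter (fun y => decide (y ≠ x))).flatMap f)).filter (fun z => decide (z ∉ f x))
      = (pvDedup (M.flatMap f)).filter (fun z => decide (z ∉ f x)) := by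
  have comm : ∀ (l : List β) (p q : β → Bool), (l.filter p).filter q = (l.filter q).filter p := by
    intro l p q; simp [List.filter_filter, Bool.and_comm]
  induction M with
  | nil => rfl
  | cons y M' ih =>
    by_cases e : y = x
    · subst e
      have hy : decide (y ≠ y) = false := by simp
      simp only [List.filter_cons, hy, Bool.false_eq_true, if_false]
      rw [ih]
      rw [List.flatMap_cons, pv_dedup_append, List.filter_append]
      have h1 : (pvDedup (f y)).filter (fun z => decide (z ∉ f y)) = [] := by
        apply List.filter_eq_nil_iff.mpr
        intro a ha
        simp [(pv_mem_dedup _ _).mp ha]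
      rw [h1, List.nil_append, List.filter_filter]
      congr 1
      funext a
      by_cases m : a ∈ f y <;> simp [m]
    · have hy : decide (y ≠ x) = true := by simp [e]
      simp only [List.filter_cons, hy, if_true]
      rw [List.flatMap_cons, List.flatMap_cons, pv_dedup_append, pv_dedup_append,
        List.filter_append, List.filter_append]
      congr 1
      rw [comm _ _ (fun z => decide (z ∉ f x)), ih, comm]

theorem pv_flatMap_dedup {α β : Type} [DecidableEq α] [DecidableEq β]
    (f : α → List β) (L : List α) :
    pvDedup ((pvDedup L).flatMap f) = pvDedup (L.flatMap f) := by
  induction L with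
  | nil => rfl
  | cons x L' ih =>
    simp only [pvDedup, List.flatMap_cons]
    rw [pv_dedup_append, pv_dedup_append, pv_flatMap_filter_ne, ih]

-- bridge: PySem's ordered dedup (dict.fromkeys / set insertion order) is pvDedup
theorem pv_ofList_eq {α : Type} [BEq α] [LawfulBEq α] [DecidableEq α] (xs : List α) :
    PySem.Set.ofList xs = pvDedup xs := by
  induction xs with
  | nil => rfl
  | cons x xs ih =>
    show PySem.Set.update [x] xs = _
    rw [PySem.Set.update_eq_append_filter, ih]
    show x :: (pvDedup xs).filter _ = x :: (pvDedup xs).filter _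
    congr 1
    apply List.filter_congr
    intro a _
    show (!PySem.Set.contains [x] a) = decide (a ≠ x)
    have hc : PySem.Set.contains [x] a = (a == x || false) := rfl
    rw [hc]
    by_cases e : a = x <;> simp [e]

theorem pv_update_nil {α : Type} [BEq α] [LawfulBEq α] [DecidableEq α] (L : List α) :
    PySem.Set.update ([] : PySem.Set α) L = pvDedup L := by
  rw [show PySem.Set.update ([] : PySem.Set α) L = PySem.Set.ofList L from rfl, pv_ofList_eq]

theorem pvDedup_eq {α : Type} [BEq α] [LawfulBEq α] [DecidableEq α] (xs : List α) :
    PySem.List.dedup xs = pvDedup xs := by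
  rw [PySem.List.dedup_eq_ofList, pv_ofList_eq]

theorem pv_update_append {α : Type} [BEq α] [LawfulBEq α] (s : PySem.Set α) (X Y : List α) :
    PySem.Set.update (PySem.Set.update s X) Y = PySem.Set.update s (X ++ Y) := by
  show Y.foldl PySem.Set.add (X.foldl PySem.Set.add s) = (X ++ Y).foldl PySem.Set.add s
  rw [List.foldl_append]

theorem pv_update_nil_right {α : Type} [BEq α] [LawfulBEq α] (s : PySem.Set α) :
    PySem.Set.update s ([] : List α) = s := rfl

-- ---- pvDelComb facts ----
theorem pv_delComb_eq_nil (w : List Char) (k : Nat) (h : w.length < k) :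
    pvDelComb w k = [] := by
  induction w generalizing k with
  | nil => cases k with
    | zero => simp at h
    | succ k => rfl
  | cons c t ih =>
    cases k with
    | zero => simp at h
    | succ k =>
      simp only [pvDelComb]
      rw [ih k (by simp only [List.length_cons] at h; omega),
        ih (k+1) (by simp only [List.length_cons] at h; omega)]
      rfl

theorem pv_delComb_ne_nil (w : List Char) (k : Nat) (h : k ≤ w.length) :
    pvDelComb w k ≠ [] := by
  induction w generalizing k with
  | nil =>
    cases k with
    | zero => simp [pvDelComb]
    | succ k => simp at h
  | cons c t ih =>
    cases k with
    | zero => simp [pvDelComb]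
    | succ k =>
      simp only [pvDelComb]
      have := ih k (by simp only [List.length_cons] at h; omega)
      intro hc
      exact this (List.append_eq_nil_iff.mp hc).1

theorem pv_len_delComb (w : List Char) (k : Nat) (d : List Char)
    (h : d ∈ pvDelComb w k) : d.length = w.length - k := by
  induction w generalizing k d with
  | nil =>
    cases k with
    | zero => simp [pvDelComb] at h; subst h; rfl
    | succ k => simp [pvDelComb] at h
  | cons c t ih =>
    cases k with
    | zero => simp [pvDelComb] at h; subst h; rfl
    | succ k =>
      simp only [pvDelComb, List.mem_append, List.mem_map] at h
      rcases h with h | ⟨w', hw', rfl⟩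
      · have := ih k d h
        simp only [List.length_cons]
        omega
      · have h1 := ih (k+1) w' hw'
        have hk : k + 1 ≤ t.length := by
          by_contra hh
          rw [pv_delComb_eq_nil t (k+1) (by omega)] at hw'
          exact absurd hw' List.not_mem_nil
        simp only [List.length_cons]
        omega

theorem pv_del1 (w : List Char) :
    (List.range w.length).map (fun x => w.take x ++ w.drop (x+1)) = pvDelComb w 1 := by
  induction w with
  | nil => rfl
  | cons c t ih =>
    have hunf : pvDelComb (c :: t) 1 = t :: (pvDelComb t 1).map (fun u => c :: u) := by
      simp [pvDelComb]
    have htail : List.map (fun x => List.take x (c :: t) ++ List.drop (x + 1) (c :: t))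
          (List.map Nat.succ (List.range t.length))
        = List.map (fun u => c :: u)
            (List.map (fun x => List.take x t ++ List.drop (x + 1) t) (List.range t.length)) := by
      rw [List.map_map, List.map_map]
      apply List.map_congr_left
      intro x _
      simp [Function.comp, List.take_succ_cons, List.drop_succ_cons, List.cons_append]
    rw [hunf, List.length_cons, List.range_succ_eq_map, List.map_cons, ← ih, htail]
    simp

theorem pv_drop_heads {α : Type} [DecidableEq α] (g : α → List α) :
    ∀ (M A : List α), (∀ w ∈ M, w ∈ A) →
      pvDedup (A ++ M.flatMap (fun w => w :: g w)) = pvDedup (A ++ M.flatMap g) := by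
  intro M
  induction M with
  | nil => intro A _; rfl
  | cons w M' ih =>
    intro A hA
    rw [List.flatMap_cons, List.flatMap_cons, List.cons_append]
    rw [pv_dup_middle _ (hA w (by simp))]
    rw [← List.append_assoc, ← List.append_assoc]
    exact ih (A ++ g w) (fun w' hw' => List.mem_append_left _ (hA w' (by simp [hw'])))

-- ---- the combinatorial heart: one more deletion level = next combination depth ----
theorem pv_main (l : List Char) (j : Nat) :
    pvDedup ((pvDelComb l j).flatMap (fun w => pvDelComb w 1))
      = pvDedup (pvDelComb l (j + 1)) := by
  induction l generalizing j with
  | nil =>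
    cases j with
    | zero => rfl
    | succ j => rfl
  | cons c t ih =>
    cases j with
    | zero =>
      have h0 : pvDelComb (c :: t) 0 = [c :: t] := by simp [pvDelComb]
      rw [h0]
      simp [List.flatMap_cons]
    | succ j =>
      have hA := ih j
      have hB := ih (j + 1)
      have hunf : pvDelComb (c :: t) (j + 1)
          = pvDelComb t j ++ (pvDelComb t (j+1)).map (fun w => c :: w) := by
        simp [pvDelComb]
      rw [hunf, List.flatMap_append]
      have hmap : ((pvDelComb t (j+1)).map (fun w => c :: w)).flatMap (fun w => pvDelComb w 1)
          = (pvDelComb t (j+1)).flatMap (fun w => w :: (pvDelComb w 1).map (fun u => c :: u)) := by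
        rw [List.flatMap_map]
        congr 1
        funext a
        simp [pvDelComb]
      rw [hmap]
      rw [pv_drop_heads (fun w => (pvDelComb w 1).map (fun u => c :: u)) (pvDelComb t (j+1))
        ((pvDelComb t j).flatMap (fun w => pvDelComb w 1))
        (by
          intro w hw
          have h2 : w ∈ pvDedup (pvDelComb t (j+1)) := (pv_mem_dedup _ _).mpr hw
          rw [← hA] at h2
          exact (pv_mem_dedup _ _).mp h2)]
      have hmap2 : (pvDelComb t (j+1)).flatMap (fun w => (pvDelComb w 1).map (fun u => c :: u))
          = ((pvDelComb t (j+1)).flatMap (fun w => pvDelComb w 1)).map (fun u => c :: u) :=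
        List.map_flatMap.symm
      rw [hmap2]
      have hinj : Function.Injective (fun u : List Char => c :: u) := by
        intro a b hab; simpa using hab
      have hcB : pvDedup (((pvDelComb t (j+1)).flatMap (fun w => pvDelComb w 1)).map
            (fun u => c :: u)) = pvDedup ((pvDelComb t (j+1+1)).map (fun u => c :: u)) := by
        rw [pv_map_inj _ hinj, pv_map_inj _ hinj, hB]
      rw [pv_congr_left _ hA, pv_congr_right _ hcB]
      have hunf2 : pvDelComb (c :: t) (j + 1 + 1)
          = pvDelComb t (j+1) ++ (pvDelComb t (j+1+1)).map (fun w => c :: w) := by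
        simp [pvDelComb]
      rw [hunf2]

-- ---- evaluating A's BFS loop ----
def pvGen (S : List (List Char)) : List (List Char) := S.flatMap (fun w => pvDelComb w 1)

def pvLvls : Nat → List (List Char) → Int → List (List Char)
  | 0, _, _ => []
  | f + 1, S, v => if S.isEmpty then [] else
      pvGen S ++ (if v - 1 = 0 then [] else pvLvls f (pvDedup (pvGen S)) (v - 1))

theorem pv_slice (w : List Char) (x : Nat) :
    PySem.List.slice w none (some (x : Int)) ++ PySem.List.slice w (some ((x : Int) + 1)) none
      = w.take x ++ w.drop (x + 1) := by
  have h1 : (0:Int) ≤ (x : Int) := by positivity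
  have h2 : (0:Int) ≤ (x : Int) + 1 := by positivity
  rw [PySem.List.slice_to w h1, PySem.List.slice_from w h2]
  have e1 : ((x : Int)).toNat = x := by omega
  have e2 : ((x : Int) + 1).toNat = x + 1 := by omega
  rw [e1, e2]

theorem pv_step_eq (q : PySem.Dict (List Char) Int × PySem.Dict (List Char) Int)
    (w : List Char) (v : Int) :
    pvGetDelStep q (w, v) = (pvDelComb w 1).foldl
      (fun q d => (if v - 1 ≠ 0 then q.1.insert d (v - 1) else q.1, q.2.insert d 1)) q := by
  unfold pvGetDelStep
  dsimp only
  conv_rhs => rw [← pv_del1, List.foldl_map]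
  congr 1
  funext q' x
  rw [pv_slice]

theorem pv_getD_foldl (L : List (List Char)) (st : PySem.Dict (List Char) Int) (c : Int)
    (k : List Char) (d0 : Int) :
    (L.foldl (fun s d => s.insert d c) st).getD k d0 = if k ∈ L then c else st.getD k d0 := by
  induction L generalizing st with
  | nil => simp
  | cons d L' ih =>
    simp only [List.foldl_cons, ih, PySem.Dict.getD_insert]
    by_cases e : k = d
    · subst e; simp
    · by_cases m : k ∈ L' <;> simp [e, m]

theorem pv_items_foldl (L : List (List Char)) (c : Int) :
    ((L.foldl (fun s d => s.insert d c) (PySem.Dict.empty : PySem.Dict (List Char) Int)).items)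
      = (pvDedup L).map (fun w => (w, c)) := by
  have hnd : ((L.foldl (fun s d => s.insert d c)
      (PySem.Dict.empty : PySem.Dict (List Char) Int)).keys).Nodup :=
    PySem.Dict.nodup_keys_foldl_insert L (fun _ _ => c) _ PySem.Dict.nodup_keys_empty
  have hkeys : (L.foldl (fun s d => s.insert d c)
      (PySem.Dict.empty : PySem.Dict (List Char) Int)).keys = pvDedup L := by
    have h1 := PySem.Dict.keys_foldl_insert L (fun _ _ => c)
      (PySem.Dict.empty : PySem.Dict (List Char) Int)
    rw [h1, PySem.Dict.keys_empty, pv_update_nil]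
  rw [PySem.Dict.items_eq_map_keys _ hnd c, hkeys]
  apply List.map_congr_left
  intro k hk
  have hm : k ∈ L := (pv_mem_dedup _ _).mp hk
  rw [pv_getD_foldl]
  simp [hm]

theorem pv_loop_empty (f : Nat) (res : PySem.Dict (List Char) Int) :
    pvGetDelLoop f PySem.Dict.empty res = res := by
  cases f with
  | zero => rfl
  | succ f => rfl

theorem pv_lvls_nil (f : Nat) (v : Int) : pvLvls f [] v = [] := by
  cases f with
  | zero => rfl
  | succ f => rfl

theorem pv_loop (fuel : Nat) :
    ∀ (stack res : PySem.Dict (List Char) Int) (S : List (List Char)) (v : Int),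
    stack.items = S.map (fun w => (w, v)) → S.Nodup → (∀ w ∈ S, w.length < fuel) →
    (pvGetDelLoop fuel stack res).keys = PySem.Set.update res.keys (pvLvls fuel S v) := by
  induction fuel with
  | zero =>
    intro stack res S v _ _ _
    rw [show pvLvls 0 S v = [] from rfl, pv_update_nil_right]
    rfl
  | succ f ih =>
    intro stack res S v hitems hnd hlen
    cases S with
    | nil =>
      have h0 : stack.items.length = 0 := by rw [hitems]; rfl
      show (if stack.items.length = 0 then res else _).keys = _
      rw [if_pos h0, pv_lvls_nil, pv_update_nil_right]
    | cons s0 S' =>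
      have h0 : ¬ stack.items.length = 0 := by rw [hitems]; simp
      show (if stack.items.length = 0 then res
          else pvGetDelLoop f (stack.items.foldl pvGetDelStep (PySem.Dict.empty, res)).1
            (stack.items.foldl pvGetDelStep (PySem.Dict.empty, res)).2).keys = _
      rw [if_neg h0]
      set S := s0 :: S' with hS
      have hfold : stack.items.foldl pvGetDelStep (PySem.Dict.empty, res)
          = ((pvGen S).foldl (fun s d => if v - 1 ≠ 0 then s.insert d (v - 1) else s)
               PySem.Dict.empty,
             (pvGen S).foldl (fun r d => r.insert d 1) res) := by
        rw [hitems, List.foldl_map]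
        simp only [pv_step_eq]
        unfold pvGen
        conv_lhs => rw [← List.foldl_flatMap]
        exact PySem.List.foldl_prod_mk
          (fun s d => if v - 1 ≠ 0 then s.insert d (v - 1) else s)
          (fun r d => r.insert d 1) (S.flatMap fun w => pvDelComb w 1) PySem.Dict.empty res
      rw [hfold]
      have hkeys2 : ((pvGen S).foldl (fun r d => r.insert d 1) res).keys
          = PySem.Set.update res.keys (pvGen S) :=
        PySem.Dict.keys_foldl_insert (pvGen S) (fun _ _ => (1 : Int)) res
      by_cases hv : v - 1 = 0
      · have hconst : (fun (s : PySem.Dict (List Char) Int) (d : List Char) =>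
            if v - 1 ≠ 0 then s.insert d (v - 1) else s) = fun s _ => s := by
          funext s d; simp [hv]
        rw [hconst]
        have hfix : (pvGen S).foldl (fun (s : PySem.Dict (List Char) Int) _ => s)
            PySem.Dict.empty = PySem.Dict.empty := by
          induction pvGen S with
          | nil => rfl
          | cons a l ihl => simpa using ihl
        rw [hfix, pv_loop_empty, hkeys2]
        have hlv : pvLvls (f+1) S v = pvGen S := by
          show (if S.isEmpty then [] else _) = _
          rw [hS]
          simp [hv]
        rw [hlv]
      · have hstack2 : ((pvGen S).foldl
            (fun s d => if v - 1 ≠ 0 then s.insert d (v - 1) else s)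
            (PySem.Dict.empty : PySem.Dict (List Char) Int)).items
            = (pvDedup (pvGen S)).map (fun w => (w, v - 1)) := by
          have hcond : (fun (s : PySem.Dict (List Char) Int) (d : List Char) =>
              if v - 1 ≠ 0 then s.insert d (v - 1) else s)
              = fun s d => s.insert d (v - 1) := by
            funext s d; simp [hv]
          rw [hcond, pv_items_foldl]
        rw [ih _ _ (pvDedup (pvGen S)) (v - 1) hstack2 (pv_nodup _) ?hlen]
        case hlen =>
          intro w hw
          rw [pv_mem_dedup] at hw
          unfold pvGen at hw
          rw [List.mem_flatMap] at hw
          obtain ⟨w', hw', hmem⟩ := hw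
          have hlw := pv_len_delComb w' 1 w hmem
          have hne : w' ≠ [] := by
            intro e; subst e; exact absurd hmem List.not_mem_nil
          have h1 : 1 ≤ w'.length := by
            cases w' with
            | nil => exact absurd rfl hne
            | cons a l => simp
          have := hlen w' hw'
          omega
        rw [hkeys2, pv_update_append]
        have hlv : pvLvls (f+1) S v = pvGen S ++ pvLvls f (pvDedup (pvGen S)) (v - 1) := by
          show (if S.isEmpty then [] else _) = _
          rw [hS]
          simp [hv]
        rw [hlv]

-- ---- from levels to B's per-depth enumeration ----
def pvRest (w : List Char) (o : Int) (k : Nat) : List (List Char) :=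
  ((List.range ((if 1 ≤ o then min o.toNat w.length else w.length) - k)).map
    (fun i => pvDelComb w (i + (k + 1)))).flatten

theorem pv_rest_high (w : List Char) (o : Int) (k : Nat)
    (h : (if 1 ≤ o then min o.toNat w.length else w.length) ≤ k) : pvRest w o k = [] := by
  unfold pvRest
  rw [Nat.sub_eq_zero_of_le h]
  rfl

theorem pv_rest_cons (w : List Char) (o : Int) (k : Nat)
    (h : k < (if 1 ≤ o then min o.toNat w.length else w.length)) :
    pvRest w o k = pvDelComb w (k + 1) ++ pvRest w o (k + 1) := by
  unfold pvRest
  have h1 : (if 1 ≤ o then min o.toNat w.length else w.length) - k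
      = ((if 1 ≤ o then min o.toNat w.length else w.length) - (k + 1)) + 1 := by omega
  rw [h1, List.range_succ_eq_map, List.map_cons, List.flatten_cons, List.map_map]
  congr 2
  · omega
  · apply List.map_congr_left
    intro i _
    simp only [Function.comp]
    congr 1
    omega

theorem pv_dedup_all_nil (L : List (List Char)) (hne : L ≠ [])
    (hall : ∀ x ∈ L, x = ([] : List Char)) : pvDedup L = [[]] := by
  cases L with
  | nil => exact absurd rfl hne
  | cons x L' =>
    have hx := hall x (by simp)
    subst hx
    show (([] : List Char) :: (pvDedup L').filter _) = _
    have hf : (pvDedup L').filter (fun y => decide (y ≠ ([] : List Char))) = [] := by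
      apply List.filter_eq_nil_iff.mpr
      intro a ha
      have := hall a (List.mem_cons_of_mem _ ((pv_mem_dedup L' a).mp ha))
      simp [this]
    rw [hf]

theorem pv_final (f : Nat) :
    ∀ (w : List Char) (o : Int) (k : Nat),
    w.length - k < f → (1 ≤ o → (k : Int) < o) →
    pvDedup (pvLvls f (pvDedup (pvDelComb w k)) (o - k)) = pvDedup (pvRest w o k) := by
  induction f with
  | zero => intro w o k h _; omega
  | succ f ih =>
    intro w o k hf hk
    by_cases hklen : w.length < k
    · rw [pv_delComb_eq_nil w k hklen]
      rw [show (pvDedup ([] : List (List Char))) = [] from rfl, pv_lvls_nil,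
        pv_rest_high w o k (by split <;> omega)]
    · have hkle : k ≤ w.length := by omega
      set S := pvDedup (pvDelComb w k) with hSdef
      have hSne : S ≠ [] := by
        intro e
        have hne := pv_delComb_ne_nil w k hkle
        cases hC : pvDelComb w k with
        | nil => exact hne hC
        | cons a l =>
          rw [hSdef, hC] at e
          simp [pvDedup] at e
      have key1 : pvDedup (pvGen S) = pvDedup (pvDelComb w (k + 1)) := by
        show pvDedup (S.flatMap fun w => pvDelComb w 1) = _
        rw [hSdef, pv_flatMap_dedup]
        exact pv_main w k
      have hlv : pvLvls (f+1) S (o - k) = pvGen S ++ (if o - k - 1 = 0 then []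
          else pvLvls f (pvDedup (pvGen S)) (o - k - 1)) := by
        show (if S.isEmpty then [] else _) = _
        rw [if_neg (by simpa [List.isEmpty_iff] using hSne)]
      rw [hlv]
      by_cases hkn : k = w.length
      · -- S = [[]] : pvGen S = [], everything degenerates to []
        have hSval : S = [[]] := by
          rw [hSdef]
          apply pv_dedup_all_nil _ (pv_delComb_ne_nil w k hkle)
          intro x hx
          have hlx := pv_len_delComb w k x hx
          have hx0 : x.length = 0 := by omega
          exact List.length_eq_zero_iff.mp hx0
        have hgen : pvGen S = [] := by rw [hSval]; rfl
        rw [hgen, List.nil_append]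
        rw [pv_rest_high w o k (by split <;> omega)]
        by_cases ho : o - k - 1 = 0
        · rw [if_pos ho]
        · rw [if_neg ho]
          rw [show (pvDedup ([] : List (List Char))) = [] from rfl, pv_lvls_nil]
          rfl
      · have hklt : k < w.length := by omega
        by_cases ho : o - k - 1 = 0
        · rw [if_pos ho, List.append_nil, key1]
          have hD1 : k < (if 1 ≤ o then min o.toNat w.length else w.length) := by
            split <;> omega
          have hD2 : (if 1 ≤ o then min o.toNat w.length else w.length) ≤ k + 1 := by
            split <;> omega
          rw [pv_rest_cons w o k hD1, pv_rest_high w o (k+1) hD2, List.append_nil]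
        · rw [if_neg ho]
          have harg : o - (k : Int) - 1 = o - ((k : Nat) + 1 : Nat) := by push_cast; ring
          rw [key1, harg]
          have hIH := ih w o (k+1) (by omega) (by intro h1; have := hk h1; push_cast; omega)
          have hDk : k < (if 1 ≤ o then min o.toNat w.length else w.length) := by
            by_cases h1 : 1 ≤ o
            · have := hk h1
              split <;> omega
            · split <;> omega
          rw [pv_rest_cons w o k hDk]
          rw [pv_congr_right _ hIH]
          exact pv_congr_left _ key1

-- ---- get_deletions = _deletions ----
theorem pv_deletions_eq (w : List Char) (o : Int) : pvGetDeletions w o = pvDeletionsAlt w o := by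
  unfold pvGetDeletions pvDeletionsAlt
  have hitems : ((PySem.Dict.empty : PySem.Dict (List Char) Int).insert w o).items
      = [w].map (fun w' => (w', o)) := rfl
  rw [pv_loop (w.length + 2) _ _ [w] o hitems (by simp)
      (by intro x hx; simp at hx; subst hx; omega)]
  rw [show (PySem.Dict.empty : PySem.Dict (List Char) Int).keys = [] from rfl]
  rw [pv_update_nil, pvDedup_eq]
  have hfin := pv_final (w.length + 2) w o 0 (by omega) (by intro _; omega)
  rw [show pvDedup (pvDelComb w 0) = [w] from by simp [pvDelComb, pvDedup]] at hfin
  rw [show o - ((0 : Nat) : Int) = o from by simp] at hfin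
  rw [hfin, show pvRest w o 0 = ((List.range (if 1 ≤ o then min o.toNat w.length
    else w.length)).map (fun i => pvDelComb w (i + 1))).flatten from by unfold pvRest; norm_num]

-- ===== VERDICT (the statement is the Claim_ definition above) =====
theorem make_corrections_index_spec : Claim_equal_make_corrections_index := by
  intro dft c sd _ hpre
  unfold Spec_make_corrections_index make_corrections_index make_corrections_index_alt
  dsimp only
  have hpre' : (dft.map Prod.fst).Nodup := hpre
  have hnd : ((dft.filter (fun x => decide (x.2 > c))).map Prod.fst).Nodup := by
    have hsub : List.Sublist ((dft.filter (fun x => decide (x.2 > c))).map Prod.fst)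
        (dft.map Prod.fst) := List.Sublist.map Prod.fst List.filter_sublist
    exact hsub.nodup hpre'
  have h1 : (dft.foldl (fun d w => if w.2 > c then d.insert w.1 w.2 else d)
      (PySem.Dict.empty : PySem.Dict String Int))
      = (dft.filter (fun x => decide (x.2 > c))).foldl (fun d w => d.insert w.1 w.2)
          PySem.Dict.empty :=
    PySem.List.foldl_ite_eq_foldl_filter (fun w : String × Int => w.2 > c)
      (fun d w => d.insert w.1 w.2) dft PySem.Dict.empty
  have hkeys : (dft.foldl (fun d w => if w.2 > c then d.insert w.1 w.2 else d)
      (PySem.Dict.empty : PySem.Dict String Int)).keys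
      = (dft.filter (fun x => decide (x.2 > c))).map Prod.fst := by
    rw [h1]
    rw [PySem.Dict.keys_foldl_insert_key (dft.filter (fun x => decide (x.2 > c))) Prod.fst
      (fun _ w => w.2) PySem.Dict.empty]
    rw [PySem.Dict.keys_empty, pv_update_nil, pv_dedup_eq_self hnd]
  rw [hkeys, List.foldl_map]
  have h2 := PySem.List.foldl_ite_eq_foldl_filter (fun w : String × Int => w.2 > c)
      (fun (acc : PySem.Dict String (List String)) (x : String × Int) =>
        if PySem.Str.len x.1 > 15 then acc
        else (pvGetDeletions x.1.toList sd).foldl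
          (fun d w2 => d.modify (String.ofList w2) [] (fun l => l ++ [x.1])) acc)
      dft PySem.Dict.empty
  rw [← h2]
  have hstep : (fun (acc : PySem.Dict String (List String)) (x : String × Int) =>
      if x.2 > c then
        (if PySem.Str.len x.1 > 15 then acc
         else (pvGetDeletions x.1.toList sd).foldl
           (fun d w2 => d.modify (String.ofList w2) [] (fun l => l ++ [x.1])) acc)
      else acc)
      = (fun (idx : PySem.Dict String (List String)) (p : String × Int) =>
      if p.2 ≤ c ∨ PySem.Str.len p.1 > 15 then idx
      else (pvDeletionsAlt p.1.toList sd).foldl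
        (fun idx w2 => idx.modify (String.ofList w2) [] (fun l => l ++ [p.1])) idx) := by
    funext d p
    simp only [pv_deletions_eq]
    by_cases hc1 : p.2 > c
    · by_cases hc2 : PySem.Str.len p.1 > 15
      · rw [if_pos hc1, if_pos hc2, if_pos (Or.inr hc2)]
      · rw [if_pos hc1, if_neg hc2,
          if_neg (fun hor => hor.elim (fun hle => absurd hc1 (not_lt.mpr hle)) (fun hgt => hc2 hgt))]
    · rw [if_neg hc1, if_pos (Or.inl (by omega))]
  rw [hstep]
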